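-- pv_equiv track=rewrite | github.com/michaelrolphone-cmyk/book-writer | book_writer/writer.py | _strip_leading_heading
-- ===== SOURCE A (Python) =====
-- def _strip_leading_heading(content: str) -> str:
--     lines = content.splitlines()
--     for index, line in enumerate(lines):
--         if line.strip().startswith("#"):
--             remainder = lines[index + 1 :]
--             while remainder and not remainder[0].strip():
--                 remainder = remainder[1:]
--             return "\n".join(remainder).strip()
--     return content.strip()
-- ===== SOURCE B (Python) =====
-- def _strip_leading_heading(content: str) -> str:
--     tail = None
--     suffix = []
--     for line in reversed(content.splitlines()):
--         if line.strip().startswith("#"):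
--             tail = suffix
--         suffix = [line] + suffix
--     if tail is None:
--         return content.strip()
--     return "\n".join(tail).strip()
-- ===== Notes on version B (the rewrite author's own statement) =====
-- stated objective: alternative
-- what changed: A scans forward by index, slices the tail and trims blank lines with an inner while loop; B makes one reverse pass with an accumulator, building each suffix back-to-front and overwriting the candidate tail whenever it meets a heading (the last overwrite is the leftmost heading), with no index, no slicing and no inner loop.
import Mathlib
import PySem

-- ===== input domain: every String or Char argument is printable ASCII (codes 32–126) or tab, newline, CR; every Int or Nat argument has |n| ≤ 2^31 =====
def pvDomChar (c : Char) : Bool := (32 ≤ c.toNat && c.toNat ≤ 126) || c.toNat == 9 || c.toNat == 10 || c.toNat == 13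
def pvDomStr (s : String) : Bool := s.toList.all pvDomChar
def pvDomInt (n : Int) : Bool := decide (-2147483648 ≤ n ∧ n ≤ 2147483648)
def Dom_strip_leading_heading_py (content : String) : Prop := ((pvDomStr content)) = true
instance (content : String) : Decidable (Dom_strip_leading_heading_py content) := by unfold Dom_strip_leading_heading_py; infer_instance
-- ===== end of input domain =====

-- B replaces A's forward index scan with inner blank-skipping while loop by a single
-- reverse pass building the tail back-to-front with an accumulator; same return value.

-- ===== PORT A =====
-- the inner 'while remainder and not remainder[0].strip(): remainder = remainder[1:]'
def pvDropBlank (xs : List String) : List String :=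
  match xs with
  | [] => []
  | r :: rest => if PySem.Str.strip r == "" then pvDropBlank rest else r :: rest

-- the 'for index, line in enumerate(lines)' loop; 'rest' is lines[index+1:]
def pvLoopA (content : String) (lines : List String) : String :=
  match lines with
  | [] => PySem.Str.strip content
  | line :: rest =>
    if PySem.Str.startswith (PySem.Str.strip line) "#" then
      PySem.Str.strip (PySem.Str.join "\n" (pvDropBlank rest))
    else pvLoopA content rest

def strip_leading_heading_py (content : String) : String :=
  pvLoopA content (PySem.Str.splitlines content)

-- ===== PORT B =====
-- one step of B's 'for line in reversed(lines)' loop on state (tail, suffix)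
def pvStepB (st : Option (List String) × List String) (line : String) :
    Option (List String) × List String :=
  ((if PySem.Str.startswith (PySem.Str.strip line) "#" then some st.2 else st.1),
   line :: st.2)

def strip_leading_heading_py_alt (content : String) : String :=
  let st := ((PySem.Str.splitlines content).reverse).foldl pvStepB (none, [])
  match st.1 with
  | none => PySem.Str.strip content
  | some tail => PySem.Str.strip (PySem.Str.join "\n" tail)

-- ===== PRECONDITION & SPEC =====
def Spec_strip_leading_heading_py (content : String) (out : String) : Prop := out = strip_leading_heading_py_alt content
instance (content : String) (out : String) : Decidable (Spec_strip_leading_heading_py content out) := by unfold Spec_strip_leading_heading_py; infer_instance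

-- ===== CLAIM (what is proved, stated in full; the proofs are below) =====
def Claim_equal_strip_leading_heading_py : Prop := ∀ (content : String), Dom_strip_leading_heading_py content → Spec_strip_leading_heading_py content (strip_leading_heading_py content)

-- ===== LEMMAS AND PROOFS =====

-- a string whose Python strip() is empty is all whitespace
lemma strip_eq_empty_all_isspace (s : String) (h : PySem.Str.strip s = "") :
    ∀ c ∈ s.toList, PySem.Chars.isspace c = true := by
  have h' : PySem.Chars.strip s.toList = [] := by
    have := congrArg String.toList h
    simpa [PySem.Str.strip] using this
  unfold PySem.Chars.strip PySem.Chars.rstrip PySem.Chars.lstrip at h'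
  have h2 : List.dropWhile PySem.Chars.isspace
      (List.dropWhile PySem.Chars.isspace s.toList).reverse = [] := by
    simpa [List.reverse_eq_nil_iff] using h'
  rw [List.dropWhile_eq_nil_iff] at h2
  intro c hc
  by_cases hsp : PySem.Chars.isspace c = true
  · exact hsp
  · exfalso
    have hmem : c ∈ List.dropWhile PySem.Chars.isspace s.toList := by
      have hsplit := List.takeWhile_append_dropWhile (p := PySem.Chars.isspace) (l := s.toList)
      rw [← hsplit] at hc
      rcases List.mem_append.mp hc with h1 | h1
      · exact absurd (List.mem_takeWhile_imp h1) hsp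
      · exact h1
    exact hsp (h2 c (List.mem_reverse.mpr hmem))

-- dropping a leading all-whitespace segment (plus the '\n' separator) before strip is a no-op
lemma chars_strip_join_ws_cons (cs : List Char) (ts : List (List Char))
    (hws : ∀ c ∈ cs, PySem.Chars.isspace c = true) :
    PySem.Chars.strip (PySem.Chars.join ['\n'] (cs :: ts)) =
      PySem.Chars.strip (PySem.Chars.join ['\n'] ts) := by
  have hd : List.dropWhile PySem.Chars.isspace cs = [] :=
    List.dropWhile_eq_nil_iff.mpr hws
  cases ts with
  | nil =>
    simp [PySem.Chars.join_singleton, PySem.Chars.join_nil, PySem.Chars.strip,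
      PySem.Chars.lstrip, PySem.Chars.rstrip, hd]
  | cons t ts' =>
    rw [PySem.Chars.join_cons_cons]
    unfold PySem.Chars.strip PySem.Chars.lstrip
    congr 1
    rw [List.append_assoc, List.dropWhile_append, hd]
    simp [show PySem.Chars.isspace '\n' = true from by decide]

-- A's inner while-loop is redundant under the trailing strip
lemma strip_join_dropBlank (xs : List String) :
    PySem.Str.strip (PySem.Str.join "\n" (pvDropBlank xs)) =
      PySem.Str.strip (PySem.Str.join "\n" xs) := by
  induction xs with
  | nil => rfl
  | cons r rest ih =>
    unfold pvDropBlank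
    by_cases h : PySem.Str.strip r = ""
    · rw [if_pos (beq_iff_eq.mpr h), ih]
      unfold PySem.Str.strip PySem.Str.join
      congr 1
      simp only [String.toList_ofList, List.map_cons]
      have : ("\n" : String).toList = ['\n'] := by decide
      rw [this]
      exact (chars_strip_join_ws_cons r.toList (rest.map String.toList)
        (strip_eq_empty_all_isspace r h)).symm
    · rw [if_neg (by simpa using h)]

-- A's loop computes the findIdx?/drop formulation
lemma loopA_eq_findIdx (content : String) (lines : List String) :
    pvLoopA content lines =
      match lines.findIdx? (fun line => PySem.Str.startswith (PySem.Str.strip line) "#") with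
      | none => PySem.Str.strip content
      | some i => PySem.Str.strip (PySem.Str.join "\n" (lines.drop (i + 1))) := by
  induction lines with
  | nil => rfl
  | cons line rest ih =>
    unfold pvLoopA
    by_cases h : PySem.Str.startswith (PySem.Str.strip line) "#" = true
    · rw [if_pos h]
      simp only [List.findIdx?_cons, h]
      simpa using strip_join_dropBlank rest
    · have h' : PySem.Str.startswith (PySem.Str.strip line) "#" = false :=
        Bool.eq_false_iff.mpr h
      rw [if_neg h, ih, List.findIdx?_cons]
      cases hf : rest.findIdx? (fun line => PySem.Str.startswith (PySem.Str.strip line) "#") with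
      | none => simp only [h', Bool.false_eq_true, if_false, Option.map_none]
      | some i =>
        simp only [h', Bool.false_eq_true, if_false, Option.map_some]
        rfl

-- B's reverse fold computes (findIdx?-tail, the full line list)
lemma foldB_eq_findIdx (lines : List String) :
    (lines.reverse.foldl pvStepB (none, [])) =
      ((match lines.findIdx? (fun line => PySem.Str.startswith (PySem.Str.strip line) "#") with
        | none => none
        | some i => some (lines.drop (i + 1))), lines) := by
  rw [List.foldl_reverse]
  induction lines with
  | nil => rfl
  | cons line rest ih =>
    rw [List.foldr_cons, ih]
    unfold pvStepB
    by_cases h : PySem.Str.startswith (PySem.Str.strip line) "#" = true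
    · simp only [List.findIdx?_cons, h, reduceIte]
      rfl
    · have h' : PySem.Str.startswith (PySem.Str.strip line) "#" = false :=
        Bool.eq_false_iff.mpr h
      simp only [List.findIdx?_cons, h', Bool.false_eq_true, reduceIte]
      cases hf : rest.findIdx? (fun line => PySem.Str.startswith (PySem.Str.strip line) "#") with
      | none => rfl
      | some i => simp only [Option.map_some, List.drop_succ_cons]


-- ===== VERDICT (by name: the statement is the Claim_ definition above) =====
theorem strip_leading_heading_py_spec : Claim_equal_strip_leading_heading_py := by
  intro content _
  unfold Spec_strip_leading_heading_py strip_leading_heading_py strip_leading_heading_py_alt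
  rw [loopA_eq_findIdx, foldB_eq_findIdx]
  cases hf : (PySem.Str.splitlines content).findIdx?
      (fun line => PySem.Str.startswith (PySem.Str.strip line) "#") <;> simp
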